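-- pv_equiv track=rewrite | github.com/GenryEden/kpolyakovName | 409.py | f
-- ===== SOURCE A (Python) =====
-- def f(x):
-- 	a = 0
-- 	b = 1
-- 	while x > 0:
-- 		a += 1
-- 		b *= x % 10
-- 		x //= 10
-- 	return a, b
-- ===== SOURCE B (Python) =====
-- def f(x):
--     if x <= 0:
--         return 0, 1
--     s = str(x)
--     b = 1
--     for c in s:
--         b *= int(c)
--     return len(s), b
-- ===== Notes on version B (the rewrite author's own statement) =====
-- stated objective: alternative
-- what changed: Extracts the digits by converting x to its decimal string and traversing the characters (high-to-low), instead of A's low-to-high modular-arithmetic loop with % and //.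
import Mathlib
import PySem

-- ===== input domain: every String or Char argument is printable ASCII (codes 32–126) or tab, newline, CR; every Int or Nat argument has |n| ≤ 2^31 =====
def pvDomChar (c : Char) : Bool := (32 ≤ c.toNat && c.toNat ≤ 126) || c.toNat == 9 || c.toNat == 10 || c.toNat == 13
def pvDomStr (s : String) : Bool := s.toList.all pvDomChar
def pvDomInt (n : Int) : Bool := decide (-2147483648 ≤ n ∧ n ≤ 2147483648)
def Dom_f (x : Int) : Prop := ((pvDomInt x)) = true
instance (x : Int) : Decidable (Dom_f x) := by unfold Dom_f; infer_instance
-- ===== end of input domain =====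

-- B re-implements A's modular-arithmetic digit loop as a traversal of str(x);
-- same return value everywhere, no speed claim.

-- termination helper for port A's while-loop (cited by `decreasing_by`)
theorem fLoop_dec (x : Int) (h : 0 < x) :
    (PySem.Int.floordiv x 10).toNat < x.toNat := by
  have : PySem.Int.floordiv x 10 = x / 10 :=
    Int.fdiv_eq_ediv_of_nonneg x (by norm_num)
  rw [this]
  omega

-- ===== PORT A =====
-- while x > 0: a += 1; b *= x % 10; x //= 10
def fLoop (x a b : Int) : Int × Int :=
  if h : 0 < x then
    fLoop (PySem.Int.floordiv x 10) (a + 1) (b * PySem.Int.mod x 10)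
  else
    (a, b)
termination_by x.toNat
decreasing_by exact fLoop_dec x h

def f (x : Int) : Int × Int := fLoop x 0 1

-- ===== PORT B =====
-- if x <= 0: return 0, 1; s = str(x); b = 1; for c in s: b *= int(c); return len(s), b
-- int(c) on a single decimal-digit character is exactly c.toNat - 48.
def f_alt (x : Int) : Int × Int :=
  if x ≤ 0 then (0, 1)
  else
    let s := PySem.Int.toStr x
    let b := s.toList.foldl (fun b c => b * ((c.toNat : Int) - 48)) 1
    (PySem.Str.len s, b)

-- ===== PRECONDITION & SPEC =====
def Spec_f (x : Int) (out : Int × Int) : Prop := out = f_alt x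
instance (x : Int) (out : Int × Int) : Decidable (Spec_f x out) := by unfold Spec_f; infer_instance

-- ===== CLAIM (what is proved, stated in full; the proofs are below) =====
def Claim_equal_f : Prop := ∀ (x : Int), Dom_f x → Spec_f x (f x)

-- ===== LEMMAS AND PROOFS =====

-- A's loop computes the length and product of Nat.digits 10
theorem fLoop_eq_digits (n : Nat) : ∀ (a b : Int),
    fLoop (n : Int) a b =
      (a + (Nat.digits 10 n).length, b * ((Nat.digits 10 n).map (fun d : Nat => (d : Int))).prod) := by
  induction n using Nat.strong_induction_on with
  | _ n ih =>
    intro a b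
    rcases Nat.eq_zero_or_pos n with h0 | hpos
    · subst h0; rw [fLoop]; simp
    · rw [fLoop]
      have hx : (0:Int) < (n : Int) := by exact_mod_cast hpos
      rw [dif_pos hx]
      have hdiv : PySem.Int.floordiv (n : Int) 10 = ((n / 10 : Nat) : Int) := by
        rw [PySem.Int.floordiv, Int.fdiv_eq_ediv_of_nonneg _ (by norm_num)]
        exact Eq.symm (Nat.ToInt.div_congr rfl rfl)
      have hmod : PySem.Int.mod (n : Int) 10 = ((n % 10 : Nat) : Int) := by
        rw [PySem.Int.mod, Int.fmod_eq_emod_of_nonneg _ (by norm_num)]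
        exact Eq.symm (Nat.ToInt.mod_congr rfl rfl)
      rw [hdiv, hmod, ih (n / 10) (Nat.div_lt_self hpos (by norm_num))]
      rw [Nat.digits_def' (by norm_num : 1 < 10) hpos]
      rw [Prod.mk.injEq]
      refine ⟨?_, ?_⟩
      · rw [List.length_cons]; push_cast; ring
      · rw [List.map_cons, List.prod_cons]; push_cast; ring

-- Nat.toDigitsCore is the big-endian digit string
theorem toDigitsCore_eq (fuel : Nat) : ∀ (n : Nat) (l : List Char), 0 < n → n < fuel →
    Nat.toDigitsCore 10 fuel n l = ((Nat.digits 10 n).map Nat.digitChar).reverse ++ l := by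
  induction fuel with
  | zero => intro n l h hf; omega
  | succ f ih =>
    intro n l hpos hf
    have hstep : Nat.toDigitsCore 10 (f + 1) n l =
        if n / 10 = 0 then (n % 10).digitChar :: l
        else Nat.toDigitsCore 10 f (n / 10) ((n % 10).digitChar :: l) := rfl
    rw [hstep]
    by_cases h10 : n / 10 = 0
    · rw [if_pos h10]
      have : Nat.digits 10 n = [n % 10] := by
        rw [Nat.digits_def' (by norm_num : 1 < 10) hpos, h10]
        simp
      rw [this]; simp
    · rw [if_neg h10]
      have hlt : n / 10 < f := by
        have := Nat.div_lt_self hpos (by norm_num : 1 < 10)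
        omega
      rw [ih (n / 10) _ (Nat.pos_of_ne_zero h10) hlt]
      rw [Nat.digits_def' (by norm_num : 1 < 10) hpos]
      simp

theorem digitChar_val (d : Nat) (h : d < 10) :
    ((Nat.digitChar d).toNat : Int) - 48 = (d : Int) := by
  interval_cases d <;> decide

theorem foldl_mul (g : Char → Int) (l : List Char) : ∀ (b : Int),
    l.foldl (fun b c => b * g c) b = b * (l.map g).prod := by
  induction l with
  | nil => intro b; simp
  | cons c t ih => intro b; simp [List.foldl_cons, ih]; ring

-- ===== VERDICT (by name: the statement is the Claim_ definition above) =====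
theorem f_spec : Claim_equal_f := by
  intro x _
  unfold Spec_f f f_alt
  by_cases hx : x ≤ 0
  · rw [if_pos hx, fLoop, dif_neg (by omega)]
  · have hx' : 0 < x := by omega
    obtain ⟨n, rfl⟩ : ∃ n : Nat, x = (n : Int) := ⟨x.toNat, by omega⟩
    have hnpos : 0 < n := by exact_mod_cast hx'
    rw [if_neg hx, fLoop_eq_digits n 0 1]
    have htc : PySem.Int.toChars (n : Int) = ((Nat.digits 10 n).map Nat.digitChar).reverse := by
      rw [PySem.Int.toChars, if_neg (by omega : ¬ (n : Int) < 0), Nat.toDigits]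
      simp only [Int.toNat_natCast]
      rw [toDigitsCore_eq (n + 1) n [] hnpos (Nat.lt_succ_self n)]
      simp
    have hlist : (PySem.Int.toStr (n : Int)).toList =
        ((Nat.digits 10 n).map Nat.digitChar).reverse := by
      rw [PySem.Int.toList_toStr, htc]
    have hmap : ((Nat.digits 10 n).map Nat.digitChar).reverse.map
          (fun c => ((c.toNat : Int) - 48))
        = ((Nat.digits 10 n).map (fun d : Nat => (d : Int))).reverse := by
      rw [← List.map_reverse, List.map_map, ← List.map_reverse]
      refine List.map_congr_left fun d hd => ?_
      exact digitChar_val d (Nat.digits_lt_base (by norm_num) (List.mem_reverse.mp hd))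
    simp only [PySem.Str.len, hlist, foldl_mul, hmap, List.prod_reverse, one_mul, zero_add,
      List.length_reverse, List.length_map]
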